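-- pv_equiv track=rewrite | github.com/clivegross/astroscheduler | astroscheduler/astroschedule.py | offset_hour_minute
-- ===== SOURCE A (Python) =====
-- def offset_hour_minute(entry, offset):
--     """
--     Adjust the hour and minute of an entry by applying an offset, handling negative minutes
--     and ensuring the time stays within valid ranges.
--
--     :param entry: A dictionary containing "Hour" and "Minute".
--     :param offset: A dictionary containing "Hour" and "Minute" to offset the entry.
--     :return: A new dictionary with adjusted "Hour" and "Minute".
--     """
--     entry_with_offset = offset.copy()
--     entry_with_offset["Hour"] = entry["Hour"] + offset["Hour"]
--     entry_with_offset["Minute"] = entry["Minute"] + offset["Minute"]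
--
--     # Handle negative minutes
--     while entry_with_offset["Minute"] < 0:
--         entry_with_offset["Minute"] += 60
--         entry_with_offset["Hour"] -= 1
--
--     # Handle minutes greater than or equal to 60
--     while entry_with_offset["Minute"] >= 60:
--         entry_with_offset["Minute"] -= 60
--         entry_with_offset["Hour"] += 1
--
--     # Ensure the hour stays within valid ranges (0-23)
--     if entry_with_offset["Hour"] < 0:
--         entry_with_offset["Hour"] = 0
--         entry_with_offset["Minute"] = 0  # Reset to midnight if hour goes negative
--     elif entry_with_offset["Hour"] >= 24:
--         entry_with_offset["Hour"] = 23
--         entry_with_offset["Minute"] = 59  # Cap to the last minute of the day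
--
--     return entry_with_offset
-- ===== SOURCE B (Python) =====
-- def offset_hour_minute(entry, offset):
--     """Same behaviour as A, but the two minute-normalisation while-loops are
--     replaced by a single closed-form divmod."""
--     res = offset.copy()
--     q, r = divmod(entry["Minute"] + offset["Minute"], 60)
--     h = entry["Hour"] + offset["Hour"] + q
--     if h < 0:
--         h, r = 0, 0
--     elif h >= 24:
--         h, r = 23, 59
--     res["Hour"] = h
--     res["Minute"] = r
--     return res
-- ===== Notes on version B (the rewrite author's own statement) =====
-- stated objective: simpler
-- what changed: The two while-loops that normalise the minute field one step of 60 at a time are replaced by a single closed-form divmod, and the result dict is written once at the end instead of being mutated per iteration; the clamp to [0:00, 23:59] is unchanged.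
import Mathlib
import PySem

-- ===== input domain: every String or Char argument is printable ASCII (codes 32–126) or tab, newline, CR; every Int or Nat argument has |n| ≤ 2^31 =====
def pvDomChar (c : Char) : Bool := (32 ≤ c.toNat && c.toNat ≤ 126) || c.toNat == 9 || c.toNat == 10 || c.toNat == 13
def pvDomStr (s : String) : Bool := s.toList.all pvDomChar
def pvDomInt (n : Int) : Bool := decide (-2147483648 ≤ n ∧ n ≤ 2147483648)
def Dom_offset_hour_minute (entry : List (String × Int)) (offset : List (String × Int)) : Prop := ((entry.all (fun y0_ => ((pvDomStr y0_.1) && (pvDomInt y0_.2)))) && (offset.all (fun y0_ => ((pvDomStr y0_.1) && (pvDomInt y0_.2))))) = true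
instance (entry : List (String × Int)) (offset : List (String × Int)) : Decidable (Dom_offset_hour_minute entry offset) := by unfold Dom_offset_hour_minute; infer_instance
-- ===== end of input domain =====

-- B replaces A's two step-by-60 while loops with one closed-form divmod; equivalence of return values is proved on inputs whose dicts carry "Hour" and "Minute".

-- ===== PORT A =====
-- while entry_with_offset["Minute"] < 0: Minute += 60; Hour -= 1   (loop state: the Hour/Minute fields)
def pvLoopNeg (h m : Int) : Int × Int :=
  if m < 0 then pvLoopNeg (h - 1) (m + 60) else (h, m)
termination_by (-m).toNat
decreasing_by omega

-- while entry_with_offset["Minute"] >= 60: Minute -= 60; Hour += 1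
def pvLoopBig (h m : Int) : Int × Int :=
  if 60 ≤ m then pvLoopBig (h + 1) (m - 60) else (h, m)
termination_by m.toNat
decreasing_by omega

def offset_hour_minute (entry : List (String × Int)) (offset : List (String × Int)) : List (String × Int) :=
  let e := PySem.Dict.ofList entry
  let o := PySem.Dict.ofList offset
  match e.get? "Hour", o.get? "Hour", e.get? "Minute", o.get? "Minute" with
  | some eh, some oh, some em, some om =>
    -- entry_with_offset = offset.copy(); ["Hour"] = eh+oh; ["Minute"] = em+om
    let d := (o.insert "Hour" (eh + oh)).insert "Minute" (em + om)
    -- the two while loops, acting on the Hour/Minute fields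
    let p := pvLoopNeg (eh + oh) (em + om)
    let p := pvLoopBig p.1 p.2
    -- clamp, writing the fields back (each loop iteration / clamp branch rewrites
    -- the same two keys; only the final values are observable in the result dict)
    let d := if p.1 < 0 then (d.insert "Hour" 0).insert "Minute" 0
             else if 24 ≤ p.1 then (d.insert "Hour" 23).insert "Minute" 59
             else (d.insert "Hour" p.1).insert "Minute" p.2
    d.items
  | _, _, _, _ => []  -- KeyError in Python: excluded by Pre_

-- ===== PORT B =====
def offset_hour_minute_alt (entry : List (String × Int)) (offset : List (String × Int)) : List (String × Int) :=
  let e := PySem.Dict.ofList entry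
  let o := PySem.Dict.ofList offset
  -- q, r = divmod(entry["Minute"] + offset["Minute"], 60)  (minutes are read first)
  match e.get? "Minute", o.get? "Minute" with
  | some em, some om =>
    match e.get? "Hour", o.get? "Hour" with
    | some eh, some oh =>
      let q := PySem.Int.floordiv (em + om) 60
      let r := PySem.Int.mod (em + om) 60
      let h := eh + oh + q
      let hr : Int × Int := if h < 0 then (0, 0) else if 24 ≤ h then (23, 59) else (h, r)
      ((o.insert "Hour" hr.1).insert "Minute" hr.2).items
    | none, _ => []      -- KeyError in Python: Pre_ excludes these inputs
    | some _, none => []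
  | none, _ => []        -- KeyError in Python: Pre_ excludes these inputs
  | some _, none => []

-- ===== PRECONDITION & SPEC =====
-- Pre_ excludes exactly the inputs on which Python A raises KeyError: a dict missing "Hour" or "Minute".
def Pre_offset_hour_minute (entry : List (String × Int)) (offset : List (String × Int)) : Prop :=
  "Hour" ∈ entry.map Prod.fst ∧ "Minute" ∈ entry.map Prod.fst ∧
  "Hour" ∈ offset.map Prod.fst ∧ "Minute" ∈ offset.map Prod.fst
instance (entry : List (String × Int)) (offset : List (String × Int)) : Decidable (Pre_offset_hour_minute entry offset) := by unfold Pre_offset_hour_minute; infer_instance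

def pvWitness_offset_hour_minute : (List (String × Int)) × (List (String × Int)) :=
  ([("Hour", 7), ("Minute", 40)], [("Hour", 1), ("Minute", 35)])

def Spec_offset_hour_minute (entry : List (String × Int)) (offset : List (String × Int)) (out : List (String × Int)) : Prop := out = offset_hour_minute_alt entry offset
instance (entry : List (String × Int)) (offset : List (String × Int)) (out : List (String × Int)) : Decidable (Spec_offset_hour_minute entry offset out) := by unfold Spec_offset_hour_minute; infer_instance

-- ===== CLAIM (what is proved, stated in full; the proofs are below) =====
def Claim_equal_offset_hour_minute : Prop := ∀ (entry : List (String × Int)) (offset : List (String × Int)), Dom_offset_hour_minute entry offset → Pre_offset_hour_minute entry offset → Spec_offset_hour_minute entry offset (offset_hour_minute entry offset)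

-- ===== LEMMAS AND PROOFS =====

-- the first while loop: brings a negative minute up into [0,60), floor-style
theorem pvLoopNeg_eq (h m : Int) :
    pvLoopNeg h m = if m < 0 then (h + m / 60, m % 60) else (h, m) := by
  induction h, m using pvLoopNeg.induct with
  | case1 h m hm ih =>
    rw [pvLoopNeg, if_pos hm, ih]
    split_ifs <;> simp [Prod.ext_iff] <;> omega
  | case2 h m hm =>
    rw [pvLoopNeg, if_neg hm, if_neg hm]

-- the second while loop: brings a nonnegative minute down into [0,60)
theorem pvLoopBig_eq (h m : Int) :
    pvLoopBig h m = if 0 ≤ m then (h + m / 60, m % 60) else (h, m) := by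
  induction h, m using pvLoopBig.induct with
  | case1 h m hm ih =>
    rw [pvLoopBig, if_pos hm, ih]
    split_ifs <;> simp [Prod.ext_iff] <;> omega
  | case2 h m hm =>
    rw [pvLoopBig, if_neg hm]
    split_ifs with h1
    · simp [Prod.ext_iff]; omega
    · rfl

-- both loops together are the closed-form divmod
theorem pvLoops_eq (h m : Int) :
    pvLoopBig (pvLoopNeg h m).1 (pvLoopNeg h m).2 = (h + m / 60, m % 60) := by
  rw [pvLoopNeg_eq]
  by_cases hm : m < 0
  · rw [if_pos hm]
    simp only [pvLoopBig_eq, Prod.ext_iff]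
    split_ifs with h1 <;> constructor <;> omega
  · rw [if_neg hm]
    simp only [pvLoopBig_eq, Prod.ext_iff]
    split_ifs with h1 <;> constructor <;> omega

-- overwriting an existing key commutes with inserting another key
theorem pv_insert_comm_of_contains {ν : Type} (d : PySem.Dict String ν) (k k' : String)
    (b H : ν) (hc : d.contains k = true) (hne : (k' == k) = false) :
    (d.insert k' b).insert k H = (d.insert k H).insert k' b := by
  apply PySem.Dict.ext
  have hc1 : (d.insert k' b).contains k = true := by
    rw [PySem.Dict.contains_insert]; simp [hc]
  have hc2 : (d.insert k H).contains k = true := PySem.Dict.contains_insert_self d k H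
  by_cases hck' : d.contains k' = true
  · have hc3 : (d.insert k H).contains k' = true := by
      rw [PySem.Dict.contains_insert]; simp [hck']
    rw [PySem.Dict.items_insert_of_contains _ H hc1,
        PySem.Dict.items_insert_of_contains _ b hck',
        PySem.Dict.items_insert_of_contains _ b hc3,
        PySem.Dict.items_insert_of_contains _ H hc]
    simp only [List.map_map]
    apply List.map_congr_left
    intro p _
    simp only [Function.comp_apply]
    by_cases h1 : (p.1 == k') = true
    · have h2 : (p.1 == k) = false := by
        have : p.1 = k' := by simpa using h1
        subst this; exact hne
      simp [h1, h2, hne]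
    · have hkk' : (k == k') = false := by
        have : k' ≠ k := by simpa using hne
        simpa using this.symm
      by_cases h2 : (p.1 == k) = true
      · simp [h1, h2, hkk']
      · simp [h1, h2]
  · have hck'f : d.contains k' = false := by simpa using hck'
    have hc3 : (d.insert k H).contains k' = false := by
      rw [PySem.Dict.contains_insert]; simp [hck'f, hne]
    rw [PySem.Dict.items_insert_of_contains _ H hc1,
        PySem.Dict.items_insert_of_not_contains _ b hck'f,
        PySem.Dict.items_insert_of_not_contains _ b hc3,
        PySem.Dict.items_insert_of_contains _ H hc]
    simp only [List.map_append]
    simp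
    exact fun h => absurd h (by simpa using hne)

-- the four writes A performs to "Hour"/"Minute" collapse to B's two final writes
theorem pv_chain (d : PySem.Dict String Int) (a b H M : Int) :
    (((d.insert "Hour" a).insert "Minute" b).insert "Hour" H).insert "Minute" M
      = (d.insert "Hour" H).insert "Minute" M := by
  have h1 : ((d.insert "Hour" a).insert "Minute" b).insert "Hour" H
      = ((d.insert "Hour" a).insert "Hour" H).insert "Minute" b := by
    apply pv_insert_comm_of_contains
    · exact PySem.Dict.contains_insert_self d "Hour" a
    · decide
  rw [h1, PySem.Dict.insert_insert_self, PySem.Dict.insert_insert_self]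

-- a key listed in the association list is present in the dict Python builds from it
theorem pv_contains_update {ν : Type} (l : List (String × ν)) (d : PySem.Dict String ν) (k : String) :
    (d.update l).contains k = (d.contains k || l.any fun p => p.1 == k) := by
  induction l generalizing d with
  | nil => simp [PySem.Dict.update]
  | cons p t ih =>
    simp only [PySem.Dict.update, List.foldl_cons] at ih ⊢
    rw [ih, PySem.Dict.contains_insert]
    cases hd : d.contains k <;> simp [List.any_cons, BEq.comm]

theorem pv_get?_ne_none_of_mem {ν : Type} (l : List (String × ν)) (k : String)
    (h : k ∈ l.map Prod.fst) : (PySem.Dict.ofList l).get? k ≠ none := by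
  intro hn
  rw [PySem.Dict.get?_eq_none_iff_contains] at hn
  rw [PySem.Dict.ofList, pv_contains_update] at hn
  rcases List.mem_map.mp h with ⟨p, hp, rfl⟩
  simp only [Bool.or_eq_false_iff, List.any_eq_false] at hn
  exact hn.2 p hp (by simp)

-- ===== VERDICT (by name: the statement is the Claim_ definition above) =====
theorem offset_hour_minute_spec : Claim_equal_offset_hour_minute := by
  intro entry offset _ hpre
  obtain ⟨h1, h2, h3, h4⟩ := hpre
  unfold Spec_offset_hour_minute
  cases hEH : (PySem.Dict.ofList entry).get? "Hour" with
  | none => exact absurd hEH (pv_get?_ne_none_of_mem entry "Hour" h1)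
  | some eh =>
  cases hOH : (PySem.Dict.ofList offset).get? "Hour" with
  | none => exact absurd hOH (pv_get?_ne_none_of_mem offset "Hour" h3)
  | some oh =>
  cases hEM : (PySem.Dict.ofList entry).get? "Minute" with
  | none => exact absurd hEM (pv_get?_ne_none_of_mem entry "Minute" h2)
  | some em =>
  cases hOM : (PySem.Dict.ofList offset).get? "Minute" with
  | none => exact absurd hOM (pv_get?_ne_none_of_mem offset "Minute" h4)
  | some om =>
  simp only [offset_hour_minute, offset_hour_minute_alt, hEH, hOH, hEM, hOM,
    pvLoops_eq, PySem.Int.floordiv_eq_ediv_of_pos (show (0:Int) < 60 by norm_num),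
    PySem.Int.mod_eq_emod_of_pos (show (0:Int) < 60 by norm_num)]
  split_ifs <;> simp only [pv_chain]
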